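-- pv_equiv track=rewrite | github.com/rec/test | python/k8_v2.py | count_em
-- ===== SOURCE A (Python) =====
-- import itertools, string
--
-- LETTERS = string.ascii_uppercase
--
-- NUMBERS = string.digits
--
-- def _next_chars(word):
--     if len(word) == 6:
--         return ''
--
--     letter_count = sum(i in LETTERS for i in word)
--     if letter_count == 3:
--         letters = ''
--     elif letter_count == 2 and 'K' not in word:
--         letters = 'K'
--     else:
--         letters = LETTERS
--
--     number_count = sum(i in NUMBERS for i in word)
--     if number_count == 3:
--         numbers = ''
--     elif number_count == 2 and '8' not in word:
--         numbers = '8'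
--     else:
--         numbers = NUMBERS
--
--     return letters + numbers
--
-- def count_em(word=None):
--     word = word or []
--     nc = _next_chars(word)
--     if not nc:
--         yield ''.join(word)
--     else:
--         for c in nc:
--             word.append(c)
--             yield from count_em(word)
--             word.pop()
-- ===== SOURCE B (Python) =====
-- import itertools, string
--
-- LETTERS = string.ascii_uppercase
-- NUMBERS = string.digits
--
--
-- def _allowed(word):
--     """Characters that may extend `word` (same rules: 3 letters forcing K, 3 digits forcing 8)."""
--     if len(word) == 6:
--         return ''
--     letter_count = sum(i in LETTERS for i in word)
--     number_count = sum(i in NUMBERS for i in word)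
--     letters = ('' if letter_count == 3 else
--                'K' if letter_count == 2 and 'K' not in word else LETTERS)
--     numbers = ('' if number_count == 3 else
--                '8' if number_count == 2 and '8' not in word else NUMBERS)
--     return letters + numbers
--
--
-- def count_em(word=None):
--     # iterative DFS with an explicit stack of partial words (copies; no mutation)
--     stack = [list(word or [])]
--     while stack:
--         cur = stack.pop()
--         nc = _allowed(cur)
--         if not nc:
--             yield ''.join(cur)
--         else:
--             for c in reversed(nc):
--                 stack.append(cur + [c])
-- ===== Notes on version B (the rewrite author's own statement) =====
-- stated objective: alternative
-- what changed: The recursive generator with in-place append/pop backtracking is replaced by an iterative DFS over an explicit stack of copied partial words (children pushed in reverse so the yield order is identical); equivalence is about the returned sequence only (A temporarily mutates a passed-in list but restores it).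
import Mathlib
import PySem

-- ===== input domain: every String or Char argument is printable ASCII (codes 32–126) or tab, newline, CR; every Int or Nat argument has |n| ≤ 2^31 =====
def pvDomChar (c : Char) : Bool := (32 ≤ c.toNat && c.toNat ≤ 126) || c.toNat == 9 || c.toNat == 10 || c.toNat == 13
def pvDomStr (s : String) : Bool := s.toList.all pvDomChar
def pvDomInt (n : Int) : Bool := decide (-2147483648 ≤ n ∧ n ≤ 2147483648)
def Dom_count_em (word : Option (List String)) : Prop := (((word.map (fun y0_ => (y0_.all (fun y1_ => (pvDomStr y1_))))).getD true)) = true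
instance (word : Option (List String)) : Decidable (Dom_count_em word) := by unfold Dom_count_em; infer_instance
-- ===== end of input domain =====

-- B replaces A's recursive generator (in-place append/pop backtracking) by an iterative
-- explicit-stack DFS over copied partial words, yielding the same sequence in the same order.
-- The equivalence is about the RETURNED sequence only: A temporarily mutates a passed-in
-- list while being consumed (net effect zero — every append is popped); B never mutates it.

-- ===== PORT A =====
-- string.ascii_uppercase and string.digits, written out as char lists
def pvLETTERS : List Char :=
  ['A', 'B', 'C', 'D', 'E', 'F', 'G', 'H', 'I', 'J', 'K', 'L', 'M',
   'N', 'O', 'P', 'Q', 'R', 'S', 'T', 'U', 'V', 'W', 'X', 'Y', 'Z']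
def pvNUMBERS : List Char := ['0', '1', '2', '3', '4', '5', '6', '7', '8', '9']

-- sum(i in LETTERS for i in word): `i in LETTERS` is Python SUBSTRING membership
def pvLcount (w : List String) : Nat := w.countP (fun i => PySem.Chars.isIn i.toList pvLETTERS)
def pvNcount (w : List String) : Nat := w.countP (fun i => PySem.Chars.isIn i.toList pvNUMBERS)

-- the letters / numbers blocks of _next_chars
def pvLettersOf (w : List String) : List Char :=
  if pvLcount w == 3 then []
  else if pvLcount w == 2 && !(w.contains "K") then ['K']
  else pvLETTERS

def pvNumbersOf (w : List String) : List Char :=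
  if pvNcount w == 3 then []
  else if pvNcount w == 2 && !(w.contains "8") then ['8']
  else pvNUMBERS

def pvNextChars (w : List String) : List Char :=
  if w.length == 6 then [] else pvLettersOf w ++ pvNumbersOf w

-- the recursive generator; the fuel is only a totality guard: under Pre_ the recursion depth
-- is bounded by 7 (pvBnd_le_seven below) and the fuel is never exhausted
def pvGoA (fuel : Nat) (w : List String) : List String :=
  match fuel with
  | 0 => []
  | f + 1 =>
    let nc := pvNextChars w
    if nc.isEmpty then [PySem.Str.join "" w]
    else nc.foldl (fun acc c => acc ++ pvGoA f (w ++ [String.ofList [c]])) []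

def count_em (word : Option (List String)) : List String :=
  let w := match word with | none => [] | some l => l    -- word = word or []
  pvGoA 7 w

-- ===== PORT B =====
-- Source B's helper computes both counts first, then both allowed blocks
def pvAllowed (w : List String) : List Char :=
  if w.length == 6 then []
  else
    let letter_count := pvLcount w
    let number_count := pvNcount w
    let letters :=
      if letter_count == 3 then []
      else if letter_count == 2 && !(w.contains "K") then ['K']
      else pvLETTERS
    let numbers :=
      if number_count == 3 then []
      else if number_count == 2 && !(w.contains "8") then ['8']
      else pvNUMBERS
    letters ++ numbers

-- Source B's while-loop over a tail-top stack (children pushed in reversed order); modelled with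
-- the head of the list as the top of the stack, so the children are prepended in order.
-- The fuel is only a totality guard for the while loop; under Pre_ it is never exhausted.
def pvLoopB (fuel : Nat) (stack : List (List String)) (acc : List String) : List String :=
  match fuel, stack with
  | _, [] => acc
  | 0, _ :: _ => acc
  | f + 1, cur :: rest =>
    let nc := pvAllowed cur
    if nc.isEmpty then pvLoopB f rest (acc ++ [PySem.Str.join "" cur])
    else pvLoopB f ((nc.map (fun c => cur ++ [String.ofList [c]])) ++ rest) acc

def count_em_alt (word : Option (List String)) : List String :=
  let w := match word with | none => [] | some l => l    -- list(word or [])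
  pvLoopB 100000000000 [w] []

-- ===== PRECONDITION & SPEC =====
-- Pre_ excludes exactly the inputs on which A's recursion never reaches a base case, so that
-- consuming A's generator raises RecursionError: a start word longer than 6 whose letter- or
-- digit-count already exceeds 3 (B's while loop diverges on those inputs too).
def Pre_count_em (word : Option (List String)) : Prop :=
  let w := word.getD []
  w.length ≤ 6 ∨ (pvLcount w ≤ 3 ∧ pvNcount w ≤ 3)
instance (word : Option (List String)) : Decidable (Pre_count_em word) := by
  unfold Pre_count_em; infer_instance

def pvWitness_count_em : Option (List String) := some ["A", "B", "1", "2", "K"]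

def Spec_count_em (word : Option (List String)) (out : List String) : Prop := out = count_em_alt word
instance (word : Option (List String)) (out : List String) : Decidable (Spec_count_em word out) := by unfold Spec_count_em; infer_instance

-- ===== CLAIM (what is proved, stated in full; the proofs are below) =====
def Claim_equal_count_em : Prop := ∀ (word : Option (List String)), Dom_count_em word → Pre_count_em word → Spec_count_em word (count_em word)

-- ===== LEMMAS AND PROOFS =====

-- "the recursion from w terminates"
def pvGood (w : List String) : Prop := w.length ≤ 6 ∨ (pvLcount w ≤ 3 ∧ pvNcount w ≤ 3)

-- remaining recursion depth bound
def pvBnd (w : List String) : Nat :=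
  if w.length ≤ 6 then 7 - w.length else (3 - pvLcount w) + (3 - pvNcount w) + 1

theorem pvBnd_pos (w : List String) : 1 ≤ pvBnd w := by
  unfold pvBnd; split <;> omega

theorem pvBnd_le_seven (w : List String) : pvBnd w ≤ 7 := by
  unfold pvBnd; split <;> omega

theorem pvAllowed_eq (w : List String) : pvAllowed w = pvNextChars w := rfl

-- a 1-char string is a substring iff the char is an element
theorem pvIsIn_singleton (c : Char) (l : List Char) :
    PySem.Chars.isIn [c] l = true ↔ c ∈ l := by
  rw [PySem.Chars.isIn_iff_infix]
  exact List.singleton_infix_iff c l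

theorem pvDisj : ∀ c ∈ pvLETTERS, c ∉ pvNUMBERS := by
  have h : pvLETTERS.all (fun c => !(pvNUMBERS.contains c)) = true := by decide
  intro c hc
  simpa using List.all_eq_true.1 h c hc

-- every uppercase letter, as a 1-char string, is a substring of LETTERS and not of NUMBERS
theorem pvLet_class : ∀ c ∈ pvLETTERS,
    PySem.Chars.isIn [c] pvLETTERS = true ∧ PySem.Chars.isIn [c] pvNUMBERS = false := by
  intro c hc
  refine ⟨(pvIsIn_singleton c pvLETTERS).2 hc, ?_⟩
  have := pvDisj c hc
  rw [Bool.eq_false_iff]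
  intro h
  exact this ((pvIsIn_singleton c pvNUMBERS).1 h)

theorem pvNum_class : ∀ c ∈ pvNUMBERS,
    PySem.Chars.isIn [c] pvNUMBERS = true ∧ PySem.Chars.isIn [c] pvLETTERS = false := by
  intro c hc
  refine ⟨(pvIsIn_singleton c pvNUMBERS).2 hc, ?_⟩
  rw [Bool.eq_false_iff]
  intro h
  exact pvDisj c ((pvIsIn_singleton c pvLETTERS).1 h) hc

theorem pvLettersOf_sub (w : List String) (c : Char) (h : c ∈ pvLettersOf w) :
    c ∈ pvLETTERS ∧ pvLcount w ≠ 3 := by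
  unfold pvLettersOf at h
  split at h
  · simp at h
  · next h3 =>
    have h3' : pvLcount w ≠ 3 := by simpa using h3
    split at h
    · simp at h; subst h; exact ⟨by decide, h3'⟩
    · exact ⟨h, h3'⟩

theorem pvNumbersOf_sub (w : List String) (c : Char) (h : c ∈ pvNumbersOf w) :
    c ∈ pvNUMBERS ∧ pvNcount w ≠ 3 := by
  unfold pvNumbersOf at h
  split at h
  · simp at h
  · next h3 =>
    have h3' : pvNcount w ≠ 3 := by simpa using h3
    split at h
    · simp at h; subst h; exact ⟨by decide, h3'⟩
    · exact ⟨h, h3'⟩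

theorem pvCount_child_letter (w : List String) (c : Char) (hc : c ∈ pvLETTERS) :
    pvLcount (w ++ [String.ofList [c]]) = pvLcount w + 1 ∧
    pvNcount (w ++ [String.ofList [c]]) = pvNcount w := by
  have h := pvLet_class c hc
  constructor <;>
    simp [pvLcount, pvNcount, List.countP_append, h.1, h.2]

theorem pvCount_child_number (w : List String) (c : Char) (hc : c ∈ pvNUMBERS) :
    pvNcount (w ++ [String.ofList [c]]) = pvNcount w + 1 ∧
    pvLcount (w ++ [String.ofList [c]]) = pvLcount w := by
  have h := pvNum_class c hc
  constructor <;>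
    simp [pvLcount, pvNcount, List.countP_append, h.1, h.2]

-- a child of a good node is good and exactly one step closer to the base case
theorem pvStep (w : List String) (hg : pvGood w) (c : Char) (hc : c ∈ pvNextChars w) :
    pvGood (w ++ [String.ofList [c]]) ∧ pvBnd (w ++ [String.ofList [c]]) + 1 = pvBnd w := by
  have h6 : w.length ≠ 6 := by
    intro h; unfold pvNextChars at hc; simp [h] at hc
  have hc' : c ∈ pvLettersOf w ∨ c ∈ pvNumbersOf w := by
    unfold pvNextChars at hc
    rw [if_neg (by simpa using h6)] at hc
    exact List.mem_append.1 hc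
  have hlen : (w ++ [String.ofList [c]]).length = w.length + 1 := by simp
  rcases hc' with h | h
  · obtain ⟨hmem, hne3⟩ := pvLettersOf_sub w c h
    obtain ⟨hLc, hNc⟩ := pvCount_child_letter w c hmem
    by_cases hlt : w.length < 6
    · refine ⟨Or.inl (by omega), ?_⟩
      unfold pvBnd
      rw [if_pos (by omega), if_pos (by omega)]
      omega
    · have hgt : 6 < w.length := by omega
      rcases hg with h1 | ⟨hL, hN⟩
      · omega
      refine ⟨Or.inr ⟨by omega, by omega⟩, ?_⟩
      unfold pvBnd
      rw [if_neg (by omega), if_neg (by omega)]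
      omega
  · obtain ⟨hmem, hne3⟩ := pvNumbersOf_sub w c h
    obtain ⟨hNc, hLc⟩ := pvCount_child_number w c hmem
    by_cases hlt : w.length < 6
    · refine ⟨Or.inl (by omega), ?_⟩
      unfold pvBnd
      rw [if_pos (by omega), if_pos (by omega)]
      omega
    · have hgt : 6 < w.length := by omega
      rcases hg with h1 | ⟨hL, hN⟩
      · omega
      refine ⟨Or.inr ⟨by omega, by omega⟩, ?_⟩
      unfold pvBnd
      rw [if_neg (by omega), if_neg (by omega)]
      omega

-- A's recursion evaluated with exactly the needed fuel
def pvDfs (w : List String) : List String := pvGoA (pvBnd w) w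

theorem pvGoA_stab : ∀ (f : Nat) (w : List String), pvGood w → pvBnd w ≤ f → pvGoA f w = pvDfs w := by
  intro f
  induction f with
  | zero => intro w hg hb; have := pvBnd_pos w; omega
  | succ g ih =>
    intro w hg hb
    obtain ⟨b, hbnd⟩ : ∃ b, pvBnd w = b + 1 := ⟨pvBnd w - 1, by have := pvBnd_pos w; omega⟩
    unfold pvDfs
    rw [hbnd]
    show pvGoA (g + 1) w = pvGoA (b + 1) w
    by_cases hnc : (pvNextChars w).isEmpty
    · simp only [pvGoA, hnc, if_true]
    · simp only [pvGoA, hnc, Bool.false_eq_true, if_false]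
      apply PySem.List.foldl_congr_mem
      intro acc c hcmem
      obtain ⟨hgood', hstep⟩ := pvStep w hg c hcmem
      have hb' : pvBnd (w ++ [String.ofList [c]]) = b := by omega
      rw [ih _ hgood' (by omega), pvDfs, hb']

theorem pvDfs_base (w : List String) (h : (pvNextChars w).isEmpty) :
    pvDfs w = [PySem.Str.join "" w] := by
  obtain ⟨b, hbnd⟩ : ∃ b, pvBnd w = b + 1 := ⟨pvBnd w - 1, by have := pvBnd_pos w; omega⟩
  unfold pvDfs
  rw [hbnd]
  simp only [pvGoA, h, if_true]

theorem pvDfs_node (w : List String) (hg : pvGood w) (h : ¬ (pvNextChars w).isEmpty) :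
    pvDfs w = (pvNextChars w).flatMap (fun c => pvDfs (w ++ [String.ofList [c]])) := by
  obtain ⟨b, hbnd⟩ : ∃ b, pvBnd w = b + 1 := ⟨pvBnd w - 1, by have := pvBnd_pos w; omega⟩
  show pvGoA (pvBnd w) w = _
  rw [hbnd]
  simp only [pvGoA, h, Bool.false_eq_true, if_false]
  have h1 : (pvNextChars w).foldl (fun acc c => acc ++ pvGoA b (w ++ [String.ofList [c]])) []
      = (pvNextChars w).foldl (fun acc c => acc ++ pvDfs (w ++ [String.ofList [c]])) [] := by
    apply PySem.List.foldl_congr_mem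
    intro acc c hcmem
    obtain ⟨hgood', hstep⟩ := pvStep w hg c hcmem
    have hb' : pvBnd (w ++ [String.ofList [c]]) = b := by omega
    simp [pvDfs, hb']
  rw [h1, PySem.List.foldl_append_eq_flatMap, List.nil_append]

-- node-count bound of the tree below a word of depth bound d
def pvNb : Nat → Nat
  | 0 => 1
  | d + 1 => 1 + 36 * pvNb d

theorem pvNb_pos (d : Nat) : 1 ≤ pvNb d := by
  cases d <;> simp [pvNb]

theorem pvNb_mono {d e : Nat} (h : d ≤ e) : pvNb d ≤ pvNb e := by
  induction e with
  | zero => have : d = 0 := by omega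
            simp [this]
  | succ n ih =>
    rcases Nat.lt_or_ge d (n + 1) with h' | h'
    · have := ih (by omega)
      have hp := pvNb_pos n
      calc pvNb d ≤ pvNb n := this
        _ ≤ 1 + 36 * pvNb n := by omega
        _ = pvNb (n + 1) := rfl
    · have : d = n + 1 := by omega
      simp [this]

theorem pvNc_len (w : List String) : (pvNextChars w).length ≤ 36 := by
  unfold pvNextChars pvLettersOf pvNumbersOf
  split_ifs <;> simp [pvLETTERS, pvNUMBERS]

theorem pvLoopB_correct : ∀ (f : Nat) (stack : List (List String)) (acc : List String),
    (∀ w ∈ stack, pvGood w) → (stack.map (fun w => pvNb (pvBnd w))).sum ≤ f →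
    pvLoopB f stack acc = acc ++ (stack.map pvDfs).flatten := by
  intro f
  induction f with
  | zero =>
    intro stack acc hg hs
    cases stack with
    | nil => simp [pvLoopB]
    | cons w rest =>
      exfalso
      simp only [List.map_cons, List.sum_cons] at hs
      have := pvNb_pos (pvBnd w)
      omega
  | succ g ih =>
    intro stack acc hg hs
    cases stack with
    | nil => simp [pvLoopB]
    | cons w rest =>
      have hgw : pvGood w := hg w (List.mem_cons_self ..)
      have hgrest : ∀ x ∈ rest, pvGood x := fun x hx => hg x (List.mem_cons_of_mem _ hx)
      simp only [List.map_cons, List.sum_cons] at hs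
      show pvLoopB (g + 1) (w :: rest) acc = _
      simp only [pvLoopB, pvAllowed_eq]
      by_cases hnc : (pvNextChars w).isEmpty
      · simp only [hnc, if_true]
        rw [ih rest _ hgrest (by have := pvNb_pos (pvBnd w); omega)]
        rw [List.map_cons, List.flatten_cons, pvDfs_base w hnc]
        simp
      · simp only [hnc, Bool.false_eq_true, if_false]
        obtain ⟨b, hbnd⟩ : ∃ b, pvBnd w = b + 1 := ⟨pvBnd w - 1, by have := pvBnd_pos w; omega⟩
        have hchildBnd : ∀ c ∈ pvNextChars w, pvBnd (w ++ [String.ofList [c]]) = b := by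
          intro c hc
          obtain ⟨_, hstep⟩ := pvStep w hgw c hc
          omega
        have hchildGood : ∀ x ∈ (pvNextChars w).map (fun c => w ++ [String.ofList [c]]), pvGood x := by
          intro x hx
          obtain ⟨c, hc, rfl⟩ := List.mem_map.1 hx
          exact (pvStep w hgw c hc).1
        have hstackGood : ∀ x ∈ (pvNextChars w).map (fun c => w ++ [String.ofList [c]]) ++ rest, pvGood x := by
          intro x hx
          rcases List.mem_append.1 hx with h | h
          · exact hchildGood x h
          · exact hgrest x h
        have hchildSum :
            (((pvNextChars w).map (fun c => w ++ [String.ofList [c]])).map (fun x => pvNb (pvBnd x))).sum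
              ≤ 36 * pvNb b := by
          have hle : (((pvNextChars w).map (fun c => w ++ [String.ofList [c]])).map (fun x => pvNb (pvBnd x))).sum
              ≤ (((pvNextChars w).map (fun c => w ++ [String.ofList [c]])).map (fun x => pvNb (pvBnd x))).length • pvNb b := by
            apply List.sum_le_card_nsmul
            intro x hx
            simp only [List.map_map, List.mem_map, Function.comp] at hx
            obtain ⟨c, hc, rfl⟩ := hx
            rw [hchildBnd c hc]
          rw [smul_eq_mul] at hle
          refine le_trans hle ?_
      
          have hlen : (((pvNextChars w).map (fun c => w ++ [String.ofList [c]])).map (fun x => pvNb (pvBnd x))).length ≤ 36 := by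
            simpa using pvNc_len w
          exact Nat.mul_le_mul_right _ hlen
        have hsum : ((((pvNextChars w).map (fun c => w ++ [String.ofList [c]])) ++ rest).map (fun x => pvNb (pvBnd x))).sum ≤ g := by
          rw [List.map_append, List.sum_append]
          have : pvNb (pvBnd w) = 1 + 36 * pvNb b := by rw [hbnd]; rfl
          omega
        rw [ih _ acc hstackGood hsum]
        simp only [List.map_cons, List.flatten_cons, List.map_append, List.flatten_append]
        rw [pvDfs_node w hgw hnc]
        simp [List.flatMap_def, List.map_map, Function.comp_def]

theorem pvMain (w : List String) (hg : pvGood w) : pvGoA 7 w = pvLoopB 100000000000 [w] [] := by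
  rw [pvGoA_stab 7 w hg (pvBnd_le_seven w)]
  rw [pvLoopB_correct _ [w] [] (by simpa using hg)
    (by
      have h1 := pvNb_mono (pvBnd_le_seven w)
      have h2 : pvNb 7 ≤ 100000000000 := by norm_num [pvNb]
      simp only [List.map_cons, List.map_nil, List.sum_cons, List.sum_nil]
      omega)]
  simp

-- ===== VERDICT (by name: the statement is the Claim_ definition above) =====
theorem count_em_spec : Claim_equal_count_em := by
  unfold Claim_equal_count_em
  intro word hdom hpre
  unfold Spec_count_em
  cases word with
  | none =>
    exact pvMain [] (by simp only [Pre_count_em, pvGood, Option.getD] at hpre ⊢; exact hpre)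
  | some l =>
    exact pvMain l (by simpa [Pre_count_em, pvGood] using hpre)
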